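-- pv_equiv track=rewrite | github.com/CodingDaily101/answers | answers/dcp309.py | countSide
-- ===== SOURCE A (Python) =====
-- def countSide(ar:list):
--     head=0
--     tail= len(ar)-1
--     count =0
--
--     while head < tail:
--
--         while head< len(ar) and ar[head] != 0:
--             head+=1
--
--         while tail>0 and ar[tail] != 1:
--             tail-=1
--
--         if head<tail and ar[head]==0 and ar[tail]==1:
--             count+= tail-head
--             head+=1
--             tail-=1
--
--     return count
-- ===== SOURCE B (Python) =====
-- def countSide(ar: list):
--     zeros = _indices(ar, 0)
--     ones = _indices(ar, 1)
--     count = 0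
--     for z, o in zip(zeros, reversed(ones)):
--         if z >= o:
--             break
--         count += o - z
--     return count
--
--
-- def _indices(ar, v):
--     return [i for i, x in enumerate(ar) if x == v]
-- ===== Notes on version B (the rewrite author's own statement) =====
-- stated objective: alternative
-- what changed: Replaces A's interleaved in-place skip-loops over the array by two precomputed index lists (positions of 0s and of 1s) and a single walk over the zipped pairs (k-th zero with k-th one from the right) that stops at the first crossing.
import Mathlib
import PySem

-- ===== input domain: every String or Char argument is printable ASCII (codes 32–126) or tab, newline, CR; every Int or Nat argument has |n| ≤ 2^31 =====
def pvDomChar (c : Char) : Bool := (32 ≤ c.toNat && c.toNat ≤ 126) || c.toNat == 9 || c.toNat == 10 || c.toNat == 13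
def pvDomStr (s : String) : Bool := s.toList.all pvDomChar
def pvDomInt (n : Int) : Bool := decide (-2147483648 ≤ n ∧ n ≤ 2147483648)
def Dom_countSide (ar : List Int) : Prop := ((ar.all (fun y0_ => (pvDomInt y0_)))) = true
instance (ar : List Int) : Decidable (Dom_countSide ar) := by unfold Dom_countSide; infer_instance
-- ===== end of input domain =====

-- B precomputes the index lists of 0s and 1s and walks the zipped pairs once,
-- instead of A's interleaved skip-loops; objective: alternative decomposition (no speed claim).

-- ===== PORT A =====
-- while head < len(ar) and ar[head] != 0: head += 1
def skipHead (ar : List Int) (h : Int) : Int :=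
  if _hg : h < ar.length ∧ ¬ PySem.List.pyGet? ar h = some 0 then skipHead ar (h + 1) else h
termination_by (ar.length - h).toNat
decreasing_by omega

-- while tail > 0 and ar[tail] != 1: tail -= 1
def skipTail (ar : List Int) (t : Int) : Int :=
  if _tg : 0 < t ∧ ¬ PySem.List.pyGet? ar t = some 1 then skipTail ar (t - 1) else t
termination_by t.toNat
decreasing_by omega

-- the outer while loop; fuel only makes the recursion structural (never reached 0 on real runs)
def loopA (ar : List Int) (head tail count : Int) : Nat → Int
  | 0 => count
  | fuel + 1 =>
    if head < tail then
      let h := skipHead ar head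
      let t := skipTail ar tail
      if h < t ∧ PySem.List.pyGet? ar h = some 0 ∧ PySem.List.pyGet? ar t = some 1 then
        loopA ar (h + 1) (t - 1) (count + (t - h)) fuel
      else
        loopA ar h t count fuel
    else count

def countSide (ar : List Int) : Int :=
  loopA ar 0 ((ar.length : Int) - 1) 0 (((ar.length : Int) - 1).toNat + 2)

-- ===== PORT B =====
-- [i for i, x in enumerate(ar) if x == v]
def idxs (ar : List Int) (v : Int) : List Int :=
  ((PySem.List.enumerate ar).filter (fun p => p.2 == v)).map (fun p => p.1)

-- for z, o in zip(zeros, reversed(ones)): if z >= o: break; count += o - z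
def goB : List (Int × Int) → Int → Int
  | [], count => count
  | (z, o) :: rest, count => if z ≥ o then count else goB rest (count + (o - z))

def countSide_alt (ar : List Int) : Int :=
  goB ((idxs ar 0).zip (idxs ar 1).reverse) 0

-- ===== PRECONDITION & SPEC =====
def Spec_countSide (ar : List Int) (out : Int) : Prop := out = countSide_alt ar
instance (ar : List Int) (out : Int) : Decidable (Spec_countSide ar out) := by unfold Spec_countSide; infer_instance

-- ===== CLAIM (what is proved, stated in full; the proofs are below) =====
def Claim_equal_countSide : Prop := ∀ (ar : List Int), Dom_countSide ar → Spec_countSide ar (countSide ar)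


-- ===== LEMMAS AND PROOFS =====

-- membership in an index list
theorem mem_idxs {ar : List Int} {v z : Int} :
    z ∈ idxs ar v ↔ 0 ≤ z ∧ PySem.List.pyGet? ar z = some v := by
  unfold idxs
  constructor
  · intro hz
    simp only [List.mem_map, List.mem_filter] at hz
    obtain ⟨⟨i, x⟩, ⟨hmem, hv⟩, rfl⟩ := hz
    rw [PySem.List.mem_enumerate_iff] at hmem
    obtain ⟨k, hk, hpk⟩ := hmem
    simp only [Prod.mk.injEq] at hpk
    obtain ⟨hi, hx⟩ := hpk
    subst hi hx
    simp only [beq_iff_eq] at hv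
    constructor
    · omega
    · have h1 : (0 : Int) + (k : Int) = (k : Int) := by omega
      rw [h1, PySem.List.pyGet?_natCast, List.getElem?_eq_getElem hk, hv]
  · rintro ⟨h0, hget⟩
    have hz : z = ((z.toNat : Nat) : Int) := by omega
    rw [hz, PySem.List.pyGet?_natCast] at hget
    have hk : z.toNat < ar.length := by
      by_contra hc
      rw [List.getElem?_eq_none_iff.mpr (by omega)] at hget
      simp at hget
    have hv : ar[z.toNat] = v := by
      rw [List.getElem?_eq_getElem hk] at hget
      exact Option.some.inj hget
    simp only [List.mem_map, List.mem_filter]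
    refine ⟨((z.toNat : Int), v), ⟨?_, by simp⟩, by omega⟩
    rw [PySem.List.mem_enumerate_iff]
    exact ⟨z.toNat, hk, by rw [hv]; simp⟩

theorem mem_idxs_lt {ar : List Int} {v z : Int} (h : z ∈ idxs ar v) :
    z < ar.length := by
  obtain ⟨h0, hget⟩ := mem_idxs.mp h
  by_contra hc
  rw [(PySem.List.pyGet?_eq_none_iff ar z).mpr] at hget
  · simp at hget
  · unfold PySem.Raise.InRange; omega

theorem pairwise_idxs (ar : List Int) (v : Int) :
    (idxs ar v).Pairwise (· < ·) := by
  unfold idxs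
  refine List.Pairwise.map _ (fun p q h => h) ?_
  exact (PySem.List.pairwise_lt_enumerate ar 0).filter _

-- first element of a ≥-filter of a sorted list containing the bound
theorem head?_filter_ge {Z : List Int} (hp : Z.Pairwise (· < ·)) {h : Int} (hm : h ∈ Z) :
    (Z.filter (fun z => decide (h ≤ z))).head? = some h := by
  induction Z with
  | nil => cases hm
  | cons a zs ih =>
    rcases List.mem_cons.mp hm with rfl | hm'
    · simp
    · have ha : a < h := (List.pairwise_cons.mp hp).1 _ hm'
      have hd : decide (h ≤ a) = false := by simp; omega
      simp only [List.filter_cons, hd, if_neg Bool.false_ne_true]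
      exact ih (List.pairwise_cons.mp hp).2 hm'

-- last element of a ≤-filter of a sorted list containing the bound
theorem getLast?_filter_le {O : List Int} (hp : O.Pairwise (· < ·)) {t : Int} (hm : t ∈ O) :
    (O.filter (fun o => decide (o ≤ t))).getLast? = some t := by
  induction O with
  | nil => cases hm
  | cons a os ih =>
    rcases List.mem_cons.mp hm with rfl | hm'
    · have hnil : os.filter (fun o => decide (o ≤ t)) = [] := by
        apply List.filter_eq_nil_iff.mpr
        intro o ho
        have : t < o := (List.pairwise_cons.mp hp).1 _ ho
        simp; omega
      simp [hnil]
    · have ha : a < t := (List.pairwise_cons.mp hp).1 _ hm'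
      have hkeep : decide (a ≤ t) = true := by simp; omega
      have ihv := ih (List.pairwise_cons.mp hp).2 hm'
      simp only [List.filter_cons, hkeep, if_true]
      rw [List.getLast?_cons, ihv]
      simp

 theorem skipHead_spec (ar : List Int) (h : Int) (h0 : 0 ≤ h) (hl : h ≤ ar.length) :
    skipHead ar h =
      (((idxs ar 0).filter (fun z => decide (h ≤ z))).head?).getD ar.length := by
  fun_induction skipHead ar h with
  | case1 h hg ih =>
    obtain ⟨hlt, hne⟩ := hg
    rw [ih (by omega) (by omega)]
    congr 2
    apply List.filter_congr
    intro z hz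
    have hzm := mem_idxs.mp hz
    have : z ≠ h := by rintro rfl; exact hne hzm.2
    simp; omega
  | case2 h hg =>
    rw [Decidable.not_and_iff_not_or_not] at hg
    rcases hg with hge | hv
    · -- h = len, filter is empty
      have hlen : h = (ar.length : Int) := by omega
      have hnil : (idxs ar 0).filter (fun z => decide (h ≤ z)) = [] := by
        apply List.filter_eq_nil_iff.mpr
        intro z hz
        have := mem_idxs_lt hz
        simp; omega
      rw [hnil]; simp [hlen]
    · -- ar[h] == 0 : h is the first zero ≥ h
      rw [Decidable.not_not] at hv
      have hm : h ∈ idxs ar 0 := mem_idxs.mpr ⟨h0, hv⟩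
      rw [head?_filter_ge (pairwise_idxs ar 0) hm]
      simp

 theorem skipTail_spec (ar : List Int) (t : Int) (t0 : 0 ≤ t) :
    skipTail ar t =
      (((idxs ar 1).filter (fun o => decide (o ≤ t))).getLast?).getD 0 := by
  fun_induction skipTail ar t with
  | case1 t hg ih =>
    obtain ⟨hpos, hne⟩ := hg
    rw [ih (by omega)]
    congr 2
    apply List.filter_congr
    intro o ho
    have hom := mem_idxs.mp ho
    have : o ≠ t := by rintro rfl; exact hne hom.2
    simp; omega
  | case2 t hg =>
    rw [Decidable.not_and_iff_not_or_not] at hg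
    rcases hg with hle | hv
    · -- t = 0 : every kept element is 0, so getD 0 gives 0
      have ht : t = 0 := by omega
      subst ht
      rcases hlast : ((idxs ar 1).filter (fun o => decide (o ≤ (0:Int)))).getLast? with _ | x
      · simp
      · have hx : x ∈ (idxs ar 1).filter (fun o => decide (o ≤ (0:Int))) := by
          obtain ⟨ys, hys⟩ := List.getLast?_eq_some_iff.mp hlast
          rw [hys]; simp
        have h1 := (List.mem_filter.mp hx).1
        have h2 := (List.mem_filter.mp hx).2
        have h3 := (mem_idxs.mp h1).1
        simp only [decide_eq_true_eq] at h2
        have : x = 0 := by omega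
        simp [this]
    · rw [Decidable.not_not] at hv
      have hm : t ∈ idxs ar 1 := mem_idxs.mpr ⟨t0, hv⟩
      rw [getLast?_filter_le (pairwise_idxs ar 1) hm]
      simp

theorem loopA_stop (ar : List Int) (h t c : Int) (f : Nat) (hng : ¬ h < t) :
    loopA ar h t c (f + 1) = c := by
  simp [loopA, hng]

theorem loopA_succ (ar : List Int) (head tail count : Int) (f : Nat) :
    loopA ar head tail count (f + 1) =
      if head < tail then
        if skipHead ar head < skipTail ar tail ∧
            PySem.List.pyGet? ar (skipHead ar head) = some 0 ∧
            PySem.List.pyGet? ar (skipTail ar tail) = some 1 then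
          loopA ar (skipHead ar head + 1) (skipTail ar tail - 1)
            (count + (skipTail ar tail - skipHead ar head)) f
        else loopA ar (skipHead ar head) (skipTail ar tail) count f
      else count := rfl

theorem pairwise_filter_idxs {ar : List Int} {v : Int} {p : Int → Bool} {l : List Int}
    (heq : (idxs ar v).filter p = l) : l.Pairwise (· < ·) := by
  rw [← heq]; exact (pairwise_idxs ar v).filter _

theorem loopA_eq (ar : List Int) :
    ∀ (fuel : Nat) (head tail count : Int) (zs os : List Int),
      0 ≤ head → head ≤ ar.length → tail ≤ (ar.length : Int) - 1 →
      (idxs ar 0).filter (fun z => decide (head ≤ z)) = zs →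
      (idxs ar 1).filter (fun o => decide (o ≤ tail)) = os →
      (tail - head).toNat + 2 ≤ fuel →
      loopA ar head tail count fuel = goB (zs.zip os.reverse) count := by
  intro fuel
  induction fuel with
  | zero => intro head tail count zs os _ _ _ _ _ hf; omega
  | succ f ih =>
    intro head tail count zs os h0 hlen htail hzs hos hf
    -- facts about members of zs and os
    have hzmem : ∀ z ∈ zs, head ≤ z ∧ 0 ≤ z ∧ z < (ar.length : Int) ∧
        PySem.List.pyGet? ar z = some 0 := by
      intro z hz
      rw [← hzs, List.mem_filter] at hz
      obtain ⟨hzi, hzd⟩ := hz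
      simp only [decide_eq_true_eq] at hzd
      exact ⟨hzd, (mem_idxs.mp hzi).1, mem_idxs_lt hzi, (mem_idxs.mp hzi).2⟩
    have homem : ∀ o ∈ os, o ≤ tail ∧ 0 ≤ o ∧ o < (ar.length : Int) ∧
        PySem.List.pyGet? ar o = some 1 := by
      intro o ho
      rw [← hos, List.mem_filter] at ho
      obtain ⟨hoi, hod⟩ := ho
      simp only [decide_eq_true_eq] at hod
      exact ⟨hod, (mem_idxs.mp hoi).1, mem_idxs_lt hoi, (mem_idxs.mp hoi).2⟩
    by_cases hht : head < tail
    · -- loop body runs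
      have hH := skipHead_spec ar head h0 hlen
      have hT := skipTail_spec ar tail (by omega)
      rw [hzs] at hH
      rw [hos] at hT
      obtain ⟨f', rfl⟩ : ∃ f', f = f' + 1 := ⟨f - 1, by omega⟩
      rw [loopA_succ, if_pos hht]
      rcases zs with _ | ⟨z, zs'⟩
      · -- no zero left: head runs to len, loop stops
        have hHv : skipHead ar head = (ar.length : Int) := by simpa using hH
        have hstop : ¬ (skipHead ar head < skipTail ar tail) := by
          rcases os.eq_nil_or_concat with rfl | ⟨os', o, rfl⟩
          · have : skipTail ar tail = 0 := by simpa using hT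
            rw [hHv, this]; omega
          · simp only [List.concat_eq_append] at hT homem
            have hTv : skipTail ar tail = o := by
              rw [hT, List.getLast?_concat]; rfl
            have := (homem o (by simp)).2.2.1
            rw [hHv, hTv]; omega
        have hgneg : ¬ (skipHead ar head < skipTail ar tail ∧
            PySem.List.pyGet? ar (skipHead ar head) = some 0 ∧
            PySem.List.pyGet? ar (skipTail ar tail) = some 1) := fun hc => hstop hc.1
        rw [if_neg hgneg, loopA_stop ar _ _ _ _ hstop]
        simp [goB]
      · have hHv : skipHead ar head = z := by simpa using hH
        obtain ⟨hz_ge, hz0, hz_lt, hz_get⟩ := hzmem z (by simp)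
        rcases os.eq_nil_or_concat with rfl | ⟨os', o, rfl⟩
        · -- no one left: tail runs to 0, loop stops
          have hTv : skipTail ar tail = 0 := by simpa using hT
          have hstop : ¬ (skipHead ar head < skipTail ar tail) := by
            rw [hHv, hTv]; omega
          have hgneg : ¬ (skipHead ar head < skipTail ar tail ∧
              PySem.List.pyGet? ar (skipHead ar head) = some 0 ∧
              PySem.List.pyGet? ar (skipTail ar tail) = some 1) := fun hc => hstop hc.1
          rw [if_neg hgneg, loopA_stop ar _ _ _ _ hstop]
          simp [goB]
        · simp only [List.concat_eq_append] at hT homem hos ⊢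
          have hTv : skipTail ar tail = o := by
            rw [hT, List.getLast?_concat]; rfl
          obtain ⟨ho_le, ho0, ho_lt, ho_get⟩ := homem o (by simp)
          have hrev : (os' ++ [o]).reverse = o :: os'.reverse := by simp
          by_cases hzo : z < o
          · -- pair (z, o) is counted
            have hpzs : (z :: zs').Pairwise (· < ·) := pairwise_filter_idxs hzs
            have hpos : (os' ++ [o]).Pairwise (· < ·) := pairwise_filter_idxs hos
            -- remaining zeros
            have hzs' : (idxs ar 0).filter (fun a => decide (z + 1 ≤ a)) = zs' := by
              have h1 : (idxs ar 0).filter (fun a => decide (z + 1 ≤ a)) =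
                  (z :: zs').filter (fun a => decide (z + 1 ≤ a)) := by
                rw [← hzs, List.filter_filter]
                apply List.filter_congr
                intro a _
                by_cases hza : z + 1 ≤ a
                · have : head ≤ a := by omega
                  simp [hza, this]
                · simp [hza]
              rw [h1, List.filter_cons]
              have hd : decide (z + 1 ≤ z) = false := by simp
              rw [hd]
              simp only [Bool.false_eq_true, if_neg (by simp : ¬ False)]
              apply List.filter_eq_self.mpr
              intro a ha
              have : z < a := (List.pairwise_cons.mp hpzs).1 _ ha
              simp; omega
            -- remaining ones
            have hos' : (idxs ar 1).filter (fun a => decide (a ≤ o - 1)) = os' := by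
              have h1 : (idxs ar 1).filter (fun a => decide (a ≤ o - 1)) =
                  (os' ++ [o]).filter (fun a => decide (a ≤ o - 1)) := by
                rw [← hos, List.filter_filter]
                apply List.filter_congr
                intro a _
                by_cases hao : a ≤ o - 1
                · have : a ≤ tail := by omega
                  simp [hao, this]
                · simp [hao]
              rw [h1, List.filter_append]
              have h2 : List.filter (fun a => decide (a ≤ o - 1)) [o] = [] := by
                simp
              rw [h2, List.append_nil]
              apply List.filter_eq_self.mpr
              intro a ha
              have : a < o := (List.pairwise_append.mp hpos).2.2 a ha o (by simp)
              simp; omega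
            have hguard : skipHead ar head < skipTail ar tail ∧
                PySem.List.pyGet? ar (skipHead ar head) = some 0 ∧
                PySem.List.pyGet? ar (skipTail ar tail) = some 1 := by
              rw [hHv, hTv]; exact ⟨hzo, hz_get, ho_get⟩
            rw [if_pos hguard, hHv, hTv]
            rw [ih (z + 1) (o - 1) (count + (o - z)) zs' os' (by omega) (by omega)
              (by omega) hzs' hos' (by omega)]
            rw [hrev]
            simp only [List.zip_cons_cons, goB]
            rw [if_neg (by omega)]
          · -- z ≥ o : loop stops
            have hstop : ¬ (skipHead ar head < skipTail ar tail) := by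
              rw [hHv, hTv]; omega
            have hgneg : ¬ (skipHead ar head < skipTail ar tail ∧
                PySem.List.pyGet? ar (skipHead ar head) = some 0 ∧
                PySem.List.pyGet? ar (skipTail ar tail) = some 1) := fun hc => hstop hc.1
            rw [if_neg hgneg, loopA_stop ar _ _ _ _ hstop]
            rw [hrev]
            simp only [List.zip_cons_cons, goB]
            rw [if_pos (by omega)]
    · -- head ≥ tail : both sides return count
      rw [loopA_succ, if_neg hht]
      rcases zs with _ | ⟨z, zs'⟩
      · simp [goB]
      · rcases os.eq_nil_or_concat with rfl | ⟨os', o, rfl⟩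
        · simp [goB]
        · simp only [List.concat_eq_append] at homem ⊢
          have h1 := (hzmem z (by simp)).1
          have h2 := (homem o (by simp)).1
          have hrev : (os' ++ [o]).reverse = o :: os'.reverse := by simp
          rw [hrev]
          simp only [List.zip_cons_cons, goB]
          rw [if_pos (by omega)]

-- ===== VERDICT (by name: the statement is the Claim_ definition above) =====
theorem countSide_spec : Claim_equal_countSide := by
  intro ar _
  unfold Spec_countSide countSide countSide_alt
  refine loopA_eq ar _ 0 ((ar.length : Int) - 1) 0 _ _ (by omega) (by positivity) (by omega) ?_ ?_ (by omega)
  · apply List.filter_eq_self.mpr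
    intro z hz
    have := (mem_idxs.mp hz).1
    simp; omega
  · apply List.filter_eq_self.mpr
    intro o ho
    have := mem_idxs_lt ho
    simp; omega
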